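-- pv_equiv track=rewrite | github.com/jk-jung/problem-solving | codewars/6kyu/6_The Deaf Rats of Hamelin.py | count_deaf_rats
-- ===== SOURCE A (Python) =====
-- def count_deaf_rats(v):
--     flag = False
--     r, i, n = 0, 0, len(v)
--     while i < n:
--         x = v[i]
--         if x == 'P':
--             flag = True
--         if x == '~' or x == 'O':
--             if (x == '~' and flag) or (x == 'O' and not flag):
--                 r += 1
--             i += 1
--         i += 1
--     return r
-- ===== SOURCE B (Python) =====
-- def _deaf_before_piper(v):
--     """Scan up to the first visited 'P'; a rat occupies two chars; count rats facing away ('O')."""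
--     i, r, n = 0, 0, len(v)
--     while i < n and v[i] != 'P':
--         r += v[i] == 'O'
--         i += 2 if v[i] in '~O' else 1
--     return i, r
--
--
-- def _deaf_after_piper(v, i):
--     """From the piper onward, count rats facing away ('~')."""
--     r, n = 0, len(v)
--     while i < n:
--         r += v[i] == '~'
--         i += 2 if v[i] in '~O' else 1
--     return r
--
--
-- def count_deaf_rats(v):
--     i, before = _deaf_before_piper(v)
--     return before + _deaf_after_piper(v, i)
-- ===== Notes on version B (the rewrite author's own statement) =====
-- stated objective: alternative
-- what changed: Replaces the single flag-driven scan by a staged decomposition with no flag: one helper scans up to the first visited 'P' counting 'O' rats, a second independent helper scans the remainder counting '~' rats, and the results are summed.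
import Mathlib
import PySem

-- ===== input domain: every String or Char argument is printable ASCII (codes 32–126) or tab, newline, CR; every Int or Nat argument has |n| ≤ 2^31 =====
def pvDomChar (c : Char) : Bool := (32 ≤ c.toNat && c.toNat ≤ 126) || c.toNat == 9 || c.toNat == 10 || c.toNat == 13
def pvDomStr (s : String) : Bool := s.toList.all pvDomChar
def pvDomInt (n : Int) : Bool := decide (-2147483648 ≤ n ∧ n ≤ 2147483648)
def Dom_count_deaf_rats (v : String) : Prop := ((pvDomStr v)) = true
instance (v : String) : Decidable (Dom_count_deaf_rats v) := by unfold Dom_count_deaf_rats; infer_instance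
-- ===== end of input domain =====

-- B replaces A's single flag-driven scan by a staged decomposition with no flag:
-- one scan up to the first visited 'P' counting 'O' rats, a second independent
-- scan of the remainder counting '~' rats; same O(n) cost, different decomposition.

-- ===== PORT A =====
-- A's while loop: flag, r, i are the loop state; i advances by 2 on a rat char
def pvALoop (cs : List Char) (flag : Bool) (r : Int) (i : Nat) : Int :=
  if h : i < cs.length then
    let x := cs[i]
    let flag' := if x == 'P' then true else flag
    if x == '~' || x == 'O' then
      let r' := if (x == '~' && flag') || (x == 'O' && !flag') then r + 1 else r
      pvALoop cs flag' r' (i + 2)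
    else
      pvALoop cs flag' r (i + 1)
  else r
termination_by cs.length - i
decreasing_by all_goals omega

def count_deaf_rats (v : String) : Int :=
  pvALoop v.toList false 0 0

-- ===== PORT B =====
-- _deaf_before_piper's while loop: stop at the first visited 'P'; count 'O' rats
def pvBefore (cs : List Char) (r : Int) (i : Nat) : Nat × Int :=
  if h : i < cs.length then
    if cs[i] == 'P' then (i, r)
    else
      pvBefore cs (r + if cs[i] == 'O' then 1 else 0)
        (i + if cs[i] == '~' || cs[i] == 'O' then 2 else 1)
  else (i, r)
termination_by cs.length - i
decreasing_by split <;> omega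

-- _deaf_after_piper's while loop: count '~' rats from the piper onward
def pvAfter (cs : List Char) (r : Int) (i : Nat) : Int :=
  if h : i < cs.length then
    pvAfter cs (r + if cs[i] == '~' then 1 else 0)
      (i + if cs[i] == '~' || cs[i] == 'O' then 2 else 1)
  else r
termination_by cs.length - i
decreasing_by split <;> omega

def count_deaf_rats_alt (v : String) : Int :=
  let p := pvBefore v.toList 0 0
  p.2 + pvAfter v.toList 0 p.1

-- ===== PRECONDITION & SPEC =====
def Spec_count_deaf_rats (v : String) (out : Int) : Prop := out = count_deaf_rats_alt v
instance (v : String) (out : Int) : Decidable (Spec_count_deaf_rats v out) := by unfold Spec_count_deaf_rats; infer_instance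

-- ===== CLAIM (what is proved, stated in full; the proofs are below) =====
def Claim_equal_count_deaf_rats : Prop := ∀ (v : String), Dom_count_deaf_rats v → Spec_count_deaf_rats v (count_deaf_rats v)

-- ===== LEMMAS AND PROOFS =====

-- the accumulator of pvAfter shifts out
lemma pvAfter_shift (cs : List Char) (k : Nat) :
    ∀ (r : Int) (i : Nat), cs.length - i ≤ k →
      pvAfter cs r i = r + pvAfter cs 0 i := by
  induction k with
  | zero =>
    intro r i hk
    rw [pvAfter, pvAfter]
    simp [Nat.not_lt.mpr (by omega : cs.length ≤ i)]
  | succ k ih =>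
    intro r i hk
    by_cases h : i < cs.length
    · rw [pvAfter, pvAfter]
      simp only [dif_pos h]
      rw [ih _ _ (by split <;> omega), ih (0 + _) _ (by split <;> omega)]
      ring
    · rw [pvAfter, pvAfter]
      simp [h]

-- once the flag is true, A's loop computes B's after-piper loop
lemma pvALoop_true (cs : List Char) (k : Nat) :
    ∀ (r : Int) (i : Nat), cs.length - i ≤ k →
      pvALoop cs true r i = pvAfter cs r i := by
  induction k with
  | zero =>
    intro r i hk
    rw [pvALoop, pvAfter]
    simp [Nat.not_lt.mpr (by omega : cs.length ≤ i)]
  | succ k ih =>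
    intro r i hk
    by_cases h : i < cs.length
    · rw [pvALoop, pvAfter]
      simp only [dif_pos h]
      set x := cs[i] with hx
      cases hrat : (x == '~' || x == 'O') with
      | true =>
        have hxp : (x == 'P') = false := by
          rcases Bool.or_eq_true_iff.mp hrat with h' | h' <;> simp_all [beq_iff_eq]
        simp only [hrat, if_pos, hxp, Bool.false_eq_true, if_false]
        rw [ih _ _ (by omega)]
        rcases Bool.or_eq_true_iff.mp hrat with h' | h' <;>
          simp [beq_iff_eq.mp h']
      | false =>
        have hxt : (x == '~') = false := by
          cases hq : x == '~' <;> simp_all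
        simp only [hrat, Bool.false_eq_true, if_false, hxt, add_zero]
        cases hp : x == 'P' <;> simp only [if_pos, if_neg, Bool.false_eq_true,
          if_false, if_true] <;> exact ih _ _ (by omega)
    · rw [pvALoop, pvAfter]
      simp [h]

-- while the flag is false, A's loop is B's before-piper count plus the after-piper count
lemma pvALoop_false (cs : List Char) (k : Nat) :
    ∀ (r : Int) (i : Nat), cs.length - i ≤ k →
      pvALoop cs false r i =
        (pvBefore cs r i).2 + pvAfter cs 0 (pvBefore cs r i).1 := by
  induction k with
  | zero =>
    intro r i hk
    have hi : ¬ i < cs.length := by omega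
    rw [pvALoop, pvBefore]
    simp only [dif_neg hi]
    rw [pvAfter]
    simp [hi]
  | succ k ih =>
    intro r i hk
    by_cases h : i < cs.length
    · rw [pvALoop, pvBefore]
      simp only [dif_pos h]
      set x := cs[i] with hx
      cases hP : (x == 'P') with
      | true =>
        -- the piper is visited: A switches to the true-flag loop; B's before-loop stops
        have hxv : x = 'P' := beq_iff_eq.mp hP
        have hrat : (x == '~' || x == 'O') = false := by simp [hxv]
        simp only [hP, if_true, hrat, Bool.false_eq_true, if_false]
        rw [pvALoop_true cs (cs.length - (i+1)) r (i+1) (by omega),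
            pvAfter_shift cs (cs.length - i) r (i+1) (by omega)]
        conv_rhs => rw [pvAfter]
        have hc : cs[i] = 'P' := hx ▸ hxv
        simp [h, hc]
      | false =>
        simp only [hP, Bool.false_eq_true, if_false]
        cases hrat : (x == '~' || x == 'O') with
        | true =>
          simp only [hrat, if_pos, if_true]
          rw [ih _ (i + 2) (by omega)]
          rcases Bool.or_eq_true_iff.mp hrat with h' | h' <;>
            simp [beq_iff_eq.mp h']
        | false =>
          have hxo : (x == 'O') = false := by
            cases hq : x == 'O' <;> simp_all
          simp only [hrat, Bool.false_eq_true, if_false, hxo, add_zero]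
          exact ih _ (i + 1) (by omega)
    · rw [pvALoop, pvBefore]
      simp only [dif_neg h]
      rw [pvAfter]
      simp [h]

-- ===== VERDICT (by name: the statement is the Claim_ definition above) =====
theorem count_deaf_rats_spec : Claim_equal_count_deaf_rats := by
  intro v _
  unfold Spec_count_deaf_rats count_deaf_rats count_deaf_rats_alt
  exact pvALoop_false v.toList v.toList.length 0 0 (by omega)
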